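-- pv_equiv track=rewrite | github.com/Findit-AI/textclap | tests/fixtures/inspect_onnx.py | _has_l2_normalize_tail
-- ===== SOURCE A (Python) =====
-- def _has_l2_normalize_tail(ops: list[str]) -> bool:
--     """Return True if the trailing op pattern looks like L2-normalize.
--
--     Recognized patterns:
--       [..., LpNormalization]                (axis=-1, p=2; the canonical export)
--       [..., ReduceL2, Div]
--       [..., ReduceL2, Clip, Div]
--     """
--     if "LpNormalization" in ops:
--         return True
--     # Look for ReduceL2 followed (within 2 ops) by Div
--     for i, op in enumerate(ops):
--         if op == "ReduceL2":
--             for j in range(i + 1, min(i + 3, len(ops))):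
--                 if ops[j] == "Div":
--                     return True
--     return False
-- ===== SOURCE B (Python) =====
-- def _has_l2_normalize_tail(ops: list[str]) -> bool:
--     """Single forward pass with a two-op look-back window instead of
--     per-ReduceL2 look-ahead."""
--     prev2 = prev1 = None  # the two ops preceding the current one
--     for op in ops:
--         if op == "LpNormalization":
--             return True
--         if op == "Div" and "ReduceL2" in (prev2, prev1):
--             return True
--         prev2, prev1 = prev1, op
--     return False
-- ===== Notes on version B (the rewrite author's own statement) =====
-- stated objective: alternative
-- what changed: Replaced the whole-list membership test plus per-ReduceL2 two-op look-ahead inner loop by a single forward scan that keeps a two-op look-back window and decides at each op immediately.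
import Mathlib
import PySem

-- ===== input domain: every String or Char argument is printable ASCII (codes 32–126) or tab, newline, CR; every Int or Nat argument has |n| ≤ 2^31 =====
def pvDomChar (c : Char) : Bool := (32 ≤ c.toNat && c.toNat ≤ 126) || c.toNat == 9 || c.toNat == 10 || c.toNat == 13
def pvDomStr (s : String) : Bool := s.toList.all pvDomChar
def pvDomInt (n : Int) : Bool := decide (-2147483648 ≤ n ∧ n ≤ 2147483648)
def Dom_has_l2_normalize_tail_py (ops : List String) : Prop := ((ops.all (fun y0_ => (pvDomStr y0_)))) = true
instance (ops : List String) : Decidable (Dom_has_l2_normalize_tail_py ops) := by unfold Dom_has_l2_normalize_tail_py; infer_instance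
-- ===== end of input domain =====

-- B replaces A's whole-list membership test + per-ReduceL2 look-ahead inner loop
-- by one forward scan with a two-op look-back window (objective: alternative).

-- ===== PORT A =====
-- inner loop: for j in range(i + 1, min(i + 3, len(ops))): if ops[j] == "Div": return True
def pvAInner (ops : List String) (i : Int) : Bool :=
  (PySem.List.pyRange (i + 1) (min (i + 3) (ops.length : Int)) 1).any
    (fun j => PySem.List.pyGet? ops j == some "Div")

-- outer loop: for i, op in enumerate(ops): if op == "ReduceL2": <inner>
def pvALoop (ops : List String) : List (Int × String) → Bool
  | [] => false
  | (i, op) :: rest =>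
    if op == "ReduceL2" && pvAInner ops i then true else pvALoop ops rest

def has_l2_normalize_tail_py (ops : List String) : Bool :=
  if ops.contains "LpNormalization" then true
  else pvALoop ops (PySem.List.enumerate ops 0)

-- ===== PORT B =====
def pvBLoop : Option String → Option String → List String → Bool
  | _, _, [] => false
  | p2, p1, op :: rest =>
    if op == "LpNormalization" then true
    else if op == "Div" && (p2 == some "ReduceL2" || p1 == some "ReduceL2") then true
    else pvBLoop p1 (some op) rest

def has_l2_normalize_tail_py_alt (ops : List String) : Bool :=
  pvBLoop none none ops

-- ===== PRECONDITION & SPEC =====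
def Spec_has_l2_normalize_tail_py (ops : List String) (out : Bool) : Prop := out = has_l2_normalize_tail_py_alt ops
instance (ops : List String) (out : Bool) : Decidable (Spec_has_l2_normalize_tail_py ops out) := by unfold Spec_has_l2_normalize_tail_py; infer_instance

-- ===== CLAIM (what is proved, stated in full; the proofs are below) =====
def Claim_equal_has_l2_normalize_tail_py : Prop := ∀ (ops : List String), Dom_has_l2_normalize_tail_py ops → Spec_has_l2_normalize_tail_py ops (has_l2_normalize_tail_py ops)

-- ===== LEMMAS AND PROOFS =====

-- common characterization: "Div" at the head / within the first two elements
def pvHdDiv : List String → Bool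
  | [] => false
  | a :: _ => a == "Div"

def pvTwoDiv (l : List String) : Bool := pvHdDiv l || pvHdDiv l.tail

def pvPair : List String → Bool
  | [] => false
  | a :: rest => (a == "ReduceL2" && pvTwoDiv rest) || pvPair rest

def pvMid (ops : List String) : Bool := ops.contains "LpNormalization" || pvPair ops

theorem pvBLoop_eq (l : List String) : ∀ (p2 p1 : Option String),
    pvBLoop p2 p1 l =
      ((p2 == some "ReduceL2" && pvHdDiv l) || (p1 == some "ReduceL2" && pvTwoDiv l) || pvMid l) := by
  induction l with
  | nil => intro p2 p1; simp [pvBLoop, pvHdDiv, pvTwoDiv, pvMid, pvPair]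
  | cons a rest ih =>
    intro p2 p1
    rw [Bool.eq_iff_iff]
    simp only [pvBLoop, ih, pvMid, pvTwoDiv, pvPair, List.contains_cons, List.tail_cons]
    cases p2 <;> cases p1 <;> cases rest <;>
      by_cases hL : a = "LpNormalization" <;> by_cases hD : a = "Div" <;>
      by_cases hR : a = "ReduceL2" <;>
      simp_all [pvHdDiv, pvPair, pvMid] <;> tauto

theorem pvB_eq_mid (ops : List String) : has_l2_normalize_tail_py_alt ops = pvMid ops := by
  simp [has_l2_normalize_tail_py_alt, pvBLoop_eq]

theorem pvAInner_eq (ops : List String) (k : Nat) :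
    pvAInner ops (k : Int) = pvTwoDiv (ops.drop (k + 1)) := by
  unfold pvAInner
  by_cases h1 : ops.length ≤ k + 1
  · rw [PySem.List.pyRange_one_eq_nil (by omega)]
    rw [List.drop_eq_nil_of_le h1]
    simp [pvTwoDiv, pvHdDiv]
  · push Not at h1
    by_cases h2 : ops.length ≤ k + 2
    · have hlen : ops.length = k + 2 := by omega
      have hmin : min ((k : Int) + 3) (ops.length : Int) = (k : Int) + 2 := by
        rw [hlen]; push_cast; omega
      rw [hmin, PySem.List.pyRange_one_cons (by omega),
          PySem.List.pyRange_one_eq_nil (by omega)]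
      have : ((k : Int) + 1) = ((k + 1 : Nat) : Int) := by push_cast; ring
      rw [this]
      simp only [List.any_cons, List.any_nil, PySem.List.pyGet?_natCast]
      have hd : ops.drop (k + 1) = [ops[k + 1]] := by
        apply List.ext_getElem? ; intro j
        cases j with
        | zero => simp [hlen]
        | succ j => simp [hlen]
      rw [hd]
      simp [pvTwoDiv, pvHdDiv, List.getElem?_eq_getElem (by omega : k + 1 < ops.length)]
    · push Not at h2
      have hmin : min ((k : Int) + 3) (ops.length : Int) = (k : Int) + 3 := by omega
      rw [hmin, PySem.List.pyRange_one_cons (by omega),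
          PySem.List.pyRange_one_cons (by omega),
          PySem.List.pyRange_one_eq_nil (by omega)]
      have e1 : ((k : Int) + 1) = ((k + 1 : Nat) : Int) := by push_cast; ring
      have e2 : (((k + 1 : Nat) : Int) + 1) = ((k + 2 : Nat) : Int) := by push_cast; ring
      rw [e1, e2]
      simp only [List.any_cons, List.any_nil, PySem.List.pyGet?_natCast]
      have hd : ops.drop (k + 1) = ops[k + 1] :: ops[k + 2] :: ops.drop (k + 3) := by
        apply List.ext_getElem? ; intro j
        match j with
        | 0 => simp [List.getElem?_drop]
        | 1 => simp [List.getElem?_drop]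
        | (j + 2) => simp [List.getElem?_drop, Nat.add_assoc]
      rw [hd]
      simp only [pvTwoDiv, pvHdDiv, List.tail_cons, Bool.or_false,
        List.getElem?_eq_getElem (by omega : k + 1 < ops.length),
        List.getElem?_eq_getElem (by omega : k + 2 < ops.length)]
      rw [Bool.eq_iff_iff]
      simp

theorem pvALoop_eq (ops : List String) : ∀ (l : List String) (k : Nat),
    ops.drop k = l → pvALoop ops (PySem.List.enumerate l (k : Int)) = pvPair l := by
  intro l
  induction l with
  | nil => intro k _; simp [PySem.List.enumerate_nil, pvALoop, pvPair]
  | cons a rest ih =>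
    intro k hk
    have hrest : ops.drop (k + 1) = rest := by
      rw [← List.drop_drop] at *
      simp [hk]
    rw [PySem.List.enumerate_cons]
    simp only [pvALoop, pvPair]
    have e1 : ((k : Int) + 1) = ((k + 1 : Nat) : Int) := by push_cast; ring
    rw [e1, ih (k + 1) hrest, pvAInner_eq, hrest]
    by_cases hR : a = "ReduceL2" <;> simp [hR]

theorem pvA_eq_mid (ops : List String) : has_l2_normalize_tail_py ops = pvMid ops := by
  unfold has_l2_normalize_tail_py pvMid
  by_cases h : "LpNormalization" ∈ ops
  · simp [h]
  · have h0 : PySem.List.enumerate ops ((0 : Nat) : Int) = PySem.List.enumerate ops 0 := by norm_num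
    rw [← h0, pvALoop_eq ops ops 0 (by simp)]
    simp [h]

-- ===== VERDICT (by name: the statement is the Claim_ definition above) =====
theorem has_l2_normalize_tail_py_spec : Claim_equal_has_l2_normalize_tail_py := by
  intro ops _
  unfold Spec_has_l2_normalize_tail_py
  rw [pvA_eq_mid, pvB_eq_mid]
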